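-- pv_equiv track=rewrite | github.com/daniel-reich/ubiquitous-fiesta | sHJmjMcZPiCsEujk6_1.py | pilish_string
-- ===== SOURCE A (Python) =====
-- def pilish_string(t):
--   r,l=[],0
--   for x in'314159265358979':
--     s=t[l:l+int(x)]
--     l+=int(x)
--     if s:
--       d=l-len(t)
--       if d:s+=s[-1]*d
--       r.append(s)
--   return' '.join(r)
-- ===== SOURCE B (Python) =====
-- SIZES = [3, 1, 4, 1, 5, 9, 2, 6, 5, 3, 5, 8, 9, 7, 9]  # digits of pi
--
-- def pilish_string(t):
--     if not t:
--         return ''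
--     n = len(t)
--     consumed, k = 0, 0
--     for sz in SIZES:               # first pass: how many chars / chunks are covered
--         if consumed >= n:
--             break
--         consumed += sz
--         k += 1
--     padded = t[:consumed] + t[-1] * max(0, consumed - n)  # pad the whole string once
--     parts, pos = [], 0
--     for sz in SIZES[:k]:           # second pass: plain slicing, no per-chunk padding
--         parts.append(padded[pos:pos + sz])
--         pos += sz
--     return ' '.join(parts)
-- ===== Notes on version B (the rewrite author's own statement) =====
-- stated objective: alternative
-- what changed: Instead of padding each chunk inside one loop over the digit characters, B first walks prefix sums of the pi-digit sizes to find how much of the string is covered, pads the whole string once at the end, then slices it into the included chunks with no per-chunk logic.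
import Mathlib
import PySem

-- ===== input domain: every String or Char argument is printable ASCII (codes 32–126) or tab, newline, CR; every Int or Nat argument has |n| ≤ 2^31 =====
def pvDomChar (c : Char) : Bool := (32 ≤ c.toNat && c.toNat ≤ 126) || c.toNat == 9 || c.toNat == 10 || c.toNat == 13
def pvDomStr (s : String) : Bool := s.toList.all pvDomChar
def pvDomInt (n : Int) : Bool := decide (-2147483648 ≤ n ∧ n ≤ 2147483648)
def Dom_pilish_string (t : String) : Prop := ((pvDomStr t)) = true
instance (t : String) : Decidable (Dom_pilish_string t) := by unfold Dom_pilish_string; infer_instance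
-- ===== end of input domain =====

-- B pads the whole string once and slices it, instead of A's per-chunk padding inside one loop (alternative decomposition, same cost).

-- ===== PORT A =====
def pilish_string (t : String) : String :=
  let res := "314159265358979".toList.foldl (fun (st : List (List Char) × Int) (x : Char) =>
      -- int(x): x is a digit of the literal, the default is never taken
      let ix := (PySem.Int.ofChars? [x]).getD 0
      let s := PySem.List.slice t.toList (some st.2) (some (st.2 + ix))
      let l := st.2 + ix
      if s ≠ [] then
        let d := l - (t.toList.length : Int)
        -- s += s[-1]*d : empty for d < 0 (toNat); s ≠ [] so the index -1 is in range
        let s := if d ≠ 0 then s ++ List.replicate d.toNat (PySem.List.pyGetD s (-1) ' ') else s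
        (st.1 ++ [s], l)
      else (st.1, l)) ([], 0)
  String.ofList (PySem.Chars.join [' '] res.1)

-- ===== PORT B =====
def pilishSizes : List Int := [3, 1, 4, 1, 5, 9, 2, 6, 5, 3, 5, 8, 9, 7, 9]

-- first pass of Source B: prefix sums with break
def pilishConsume (n : Int) : List Int → Int × Nat → Int × Nat
  | [], st => st
  | sz :: rest, st => if n ≤ st.1 then st else pilishConsume n rest (st.1 + sz, st.2 + 1)

-- second pass of Source B: plain slicing
def pilishSlices (padded : List Char) : List Int → Int → List (List Char)
  | [], _ => []
  | sz :: rest, pos => PySem.List.slice padded (some pos) (some (pos + sz)) :: pilishSlices padded rest (pos + sz)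

def pilish_string_alt (t : String) : String :=
  let cs := t.toList
  if cs = [] then "" else
    let n : Int := cs.length
    let ck := pilishConsume n pilishSizes (0, 0)
    -- t[:consumed] + t[-1] * max(0, consumed - n); t ≠ '' so index -1 is in range
    let padded := PySem.List.slice cs none (some ck.1) ++
      List.replicate (max 0 (ck.1 - n)).toNat (PySem.List.pyGetD cs (-1) ' ')
    String.ofList (PySem.Chars.join [' '] (pilishSlices padded (pilishSizes.take ck.2) 0))

-- ===== PRECONDITION & SPEC =====
def Spec_pilish_string (t : String) (out : String) : Prop := out = pilish_string_alt t
instance (t : String) (out : String) : Decidable (Spec_pilish_string t out) := by unfold Spec_pilish_string; infer_instance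

-- ===== CLAIM (what is proved, stated in full; the proofs are below) =====
def Claim_equal_pilish_string : Prop := ∀ (t : String), Dom_pilish_string t → Spec_pilish_string t (pilish_string t)

-- ===== LEMMAS AND PROOFS =====

-- A's loop body as a named step function (definitionally the fold body of the port)
def stepA (cs : List Char) (st : List (List Char) × Int) (d : Int) : List (List Char) × Int :=
  let s := PySem.List.slice cs (some st.2) (some (st.2 + d))
  let l := st.2 + d
  if s ≠ [] then
    let dd := l - (cs.length : Int)
    let s := if dd ≠ 0 then s ++ List.replicate dd.toNat (PySem.List.pyGetD s (-1) ' ') else s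
    (st.1 ++ [s], l)
  else (st.1, l)

-- A's loop as a recursion producing the list of chunks directly
def goA (cs : List Char) : List Int → Int → List (List Char)
  | [], _ => []
  | d :: rest, l =>
    let s := PySem.List.slice cs (some l) (some (l + d))
    if s ≠ [] then
      (if (l + d) - (cs.length : Int) ≠ 0 then
          s ++ List.replicate ((l + d) - (cs.length : Int)).toNat (PySem.List.pyGetD s (-1) ' ')
        else s) :: goA cs rest (l + d)
    else goA cs rest (l + d)

-- B's padded string as a function of the consumed count
def paddedOf (cs : List Char) (c : Int) : List Char :=
  PySem.List.slice cs none (some c) ++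
    List.replicate (max 0 (c - (cs.length : Int))).toNat (PySem.List.pyGetD cs (-1) ' ')

lemma digits_map :
    "314159265358979".toList.map (fun x => (PySem.Int.ofChars? [x]).getD 0) = pilishSizes := by
  decide

lemma foldl_stepA (cs : List Char) :
    ∀ (ds : List Int) (r : List (List Char)) (l : Int),
      (ds.foldl (stepA cs) (r, l)).1 = r ++ goA cs ds l := by
  intro ds
  induction ds with
  | nil => intro r l; simp [goA]
  | cons d rest ih =>
    intro r l
    by_cases h : PySem.List.slice cs (some l) (some (l + d)) ≠ []
    · have hstep : stepA cs (r, l) d =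
        (r ++ [if (l + d) - (cs.length : Int) ≠ 0 then
            PySem.List.slice cs (some l) (some (l + d)) ++
              List.replicate ((l + d) - (cs.length : Int)).toNat
                (PySem.List.pyGetD (PySem.List.slice cs (some l) (some (l + d))) (-1) ' ')
          else PySem.List.slice cs (some l) (some (l + d))], l + d) := by
        simp only [stepA]; rw [if_pos h]
      rw [List.foldl_cons, hstep, ih]
      simp only [goA]; rw [if_pos h]
      simp [List.append_assoc]
    · have hstep : stepA cs (r, l) d = (r, l + d) := by
        simp only [stepA]; rw [if_neg h]
      rw [List.foldl_cons, hstep, ih]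
      simp only [goA]; rw [if_neg h]

lemma slice_toNat' (cs : List Char) (a b : Int) (ha : 0 ≤ a) (hb : 0 ≤ b) :
    PySem.List.slice cs (some a) (some b) = (cs.drop a.toNat).take (b.toNat - a.toNat) :=
  PySem.List.slice_toNat cs ha hb

lemma goA_past (cs : List Char) :
    ∀ (ds : List Int), (∀ d ∈ ds, 0 < d) → ∀ l : Int, 0 ≤ l → (cs.length : Int) ≤ l →
      goA cs ds l = [] := by
  intro ds
  induction ds with
  | nil => intro _ _ _ _; rfl
  | cons d rest ih =>
    intro hpos l hl hlen
    have hd : 0 < d := hpos d (by simp)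
    have hs : PySem.List.slice cs (some l) (some (l + d)) = [] := by
      rw [slice_toNat' cs l (l + d) hl (by omega)]
      have : cs.drop l.toNat = [] := List.drop_eq_nil_of_le (by omega)
      simp [this]
    simp only [goA]
    rw [if_neg (by simp [hs])]
    exact ih (fun d hd => hpos d (by simp [hd])) (l + d) (by omega) (by omega)

lemma consume_stop (n : Int) (ds : List Int) (st : Int × Nat) (h : n ≤ st.1) :
    pilishConsume n ds st = st := by
  cases ds with
  | nil => rfl
  | cons d rest => simp [pilishConsume, h]

lemma consume_ge (n : Int) :
    ∀ (ds : List Int), (∀ d ∈ ds, 0 ≤ d) → ∀ st : Int × Nat,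
      st.1 ≤ (pilishConsume n ds st).1 := by
  intro ds
  induction ds with
  | nil => intro _ st; simp [pilishConsume]
  | cons d rest ih =>
    intro h st
    simp only [pilishConsume]
    split
    · exact le_refl _
    · have := ih (fun d hd => h d (by simp [hd])) (st.1 + d, st.2 + 1)
      have hd : 0 ≤ d := h d (by simp)
      simp only at this
      omega

lemma consume_shift (n : Int) :
    ∀ (ds : List Int) (c : Int) (j : Nat),
      pilishConsume n ds (c, j) =
        ((pilishConsume n ds (c, 0)).1, j + (pilishConsume n ds (c, 0)).2) := by
  intro ds
  induction ds with
  | nil => intro c j; simp [pilishConsume]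
  | cons d rest ih =>
    intro c j
    simp only [pilishConsume]
    split
    · simp
    · rw [ih (c + d) (j + 1), ih (c + d) 1]
      simp; omega

-- head chunk, full-chunk case: the slice lies inside both the string and the consumed prefix
lemma chunk_full (cs : List Char) (l d C : Int) (hl : 0 ≤ l) (hd : 0 < d)
    (hb : l + d ≤ (cs.length : Int)) (hC : l + d ≤ C) :
    (let s := PySem.List.slice cs (some l) (some (l + d))
     if (l + d) - (cs.length : Int) ≠ 0 then
        s ++ List.replicate ((l + d) - (cs.length : Int)).toNat (PySem.List.pyGetD s (-1) ' ')
      else s) =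
    PySem.List.slice (paddedOf cs C) (some l) (some (l + d)) := by
  have hC0 : (0:Int) ≤ C := by omega
  have hs := slice_toNat' cs l (l + d) hl (by omega)
  have hrhs := slice_toNat' (paddedOf cs C) l (l + d) hl (by omega)
  have key : ((paddedOf cs C).drop l.toNat).take ((l + d).toNat - l.toNat) =
      (cs.drop l.toNat).take ((l + d).toNat - l.toNat) := by
    have hpad : paddedOf cs C = cs.take C.toNat ++
        List.replicate (max 0 (C - (cs.length : Int))).toNat (PySem.List.pyGetD cs (-1) ' ') := by
      simp only [paddedOf, PySem.List.slice_to cs hC0]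
    rw [hpad, List.take_drop, List.take_drop]
    have hb : l.toNat + ((l + d).toNat - l.toNat) = (l + d).toNat := by omega
    rw [hb]
    congr 1
    rw [List.take_append_of_le_length (by simp; omega), List.take_take]
    congr 1
    omega
  by_cases hdd : (l + d) - (cs.length : Int) ≠ 0
  · have h0 : ((l + d) - (cs.length : Int)).toNat = 0 := by omega
    simp only [if_pos hdd, h0, List.replicate_zero, List.append_nil, hs, hrhs, key]
  · simp only [if_neg hdd, hs, hrhs, key]

-- head chunk, last partial chunk: the whole-string padding supplies exactly A's per-chunk padding
lemma chunk_partial (cs : List Char) (l d : Int) (hl : 0 ≤ l) (hd : 0 < d)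
    (hlt : l < (cs.length : Int)) (hgt : (cs.length : Int) < l + d) :
    (let s := PySem.List.slice cs (some l) (some (l + d))
     if (l + d) - (cs.length : Int) ≠ 0 then
        s ++ List.replicate ((l + d) - (cs.length : Int)).toNat (PySem.List.pyGetD s (-1) ' ')
      else s) =
    PySem.List.slice (paddedOf cs (l + d)) (some l) (some (l + d)) := by
  have hne : cs ≠ [] := by
    intro h; rw [h] at hlt; simp at hlt; omega
  have hs : PySem.List.slice cs (some l) (some (l + d)) = cs.drop l.toNat := by
    rw [slice_toNat' cs l (l + d) hl (by omega)]
    exact List.take_of_length_le (by simp; omega)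
  have hsne : cs.drop l.toNat ≠ [] := by
    simp only [ne_eq, List.drop_eq_nil_iff]
    omega
  have hlast : PySem.List.pyGetD (cs.drop l.toNat) (-1) ' ' = PySem.List.pyGetD cs (-1) ' ' := by
    rw [PySem.List.pyGetD_neg_one _ ' ' hsne, PySem.List.pyGetD_neg_one _ ' ' hne]
    exact List.getLast_drop _
  have hdd : (l + d) - (cs.length : Int) ≠ 0 := by omega
  simp only [if_pos hdd, hs, hlast]
  have hmax : max 0 ((l + d) - (cs.length : Int)) = (l + d) - (cs.length : Int) := by omega
  have hpad : paddedOf cs (l + d) = cs ++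
      List.replicate ((l + d) - (cs.length : Int)).toNat (PySem.List.pyGetD cs (-1) ' ') := by
    simp only [paddedOf, PySem.List.slice_to cs (by omega : (0:Int) ≤ l + d), hmax]
    rw [List.take_of_length_le (by omega)]
  rw [hpad, slice_toNat' _ l (l + d) hl (by omega)]
  rw [List.drop_append_of_le_length (by omega)]
  exact (List.take_of_length_le (by simp; omega)).symm

lemma main_lemma (cs : List Char) (_hcs : cs ≠ []) :
    ∀ (ds : List Int), (∀ d ∈ ds, 0 < d) → ∀ l : Int, 0 ≤ l →
      goA cs ds l =
        pilishSlices (paddedOf cs (pilishConsume (cs.length : Int) ds (l, 0)).1)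
          (ds.take (pilishConsume (cs.length : Int) ds (l, 0)).2) l := by
  intro ds
  induction ds with
  | nil => intro _ l _; simp [goA, pilishConsume, pilishSlices]
  | cons d rest ih =>
    intro hpos l hl
    have hd : 0 < d := hpos d (by simp)
    by_cases hn : (cs.length : Int) ≤ l
    · rw [goA_past cs (d :: rest) hpos l hl hn]
      rw [consume_stop _ _ _ (by simpa using hn)]
      simp [pilishSlices]
    · rw [not_le] at hn
      have hcons : pilishConsume (cs.length : Int) (d :: rest) (l, 0) =
          pilishConsume (cs.length : Int) rest (l + d, 0 + 1) := by
        simp only [pilishConsume]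
        rw [if_neg (by simp; omega)]
      have hshift := consume_shift (cs.length : Int) rest (l + d) 1
      have hge : l + d ≤ (pilishConsume (cs.length : Int) rest (l + d, 0)).1 := by
        have := consume_ge (cs.length : Int) rest
          (fun x hx => le_of_lt (hpos x (by simp [hx]))) (l + d, 0)
        simpa using this
      have hsne : PySem.List.slice cs (some l) (some (l + d)) ≠ [] := by
        rw [slice_toNat' cs l (l + d) hl (by omega)]
        apply List.ne_nil_of_length_pos
        simp
        omega
      simp only [goA]
      rw [if_pos hsne, hcons]
      simp only [zero_add] at hcons ⊢
      rw [hshift]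
      have htail := ih (fun x hx => hpos x (by simp [hx])) (l + d) (by omega)
      by_cases hfull : l + d ≤ (cs.length : Int)
      · rw [htail]
        rw [Nat.add_comm 1 _]
        simp only [List.take_succ_cons, pilishSlices]
        congr 1
        exact chunk_full cs l d _ hl hd hfull hge
      · rw [not_le] at hfull
        have hstop : pilishConsume (cs.length : Int) rest (l + d, 0) = (l + d, 0) :=
          consume_stop _ _ _ (by simp; omega)
        rw [htail, hstop]
        simp only [List.take_zero, pilishSlices, List.take_succ_cons, Nat.add_zero]
        congr 1
        exact chunk_partial cs l d hl hd hn hfull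

-- ===== VERDICT (by name: the statement is the Claim_ definition above) =====
lemma sizes_pos : ∀ d ∈ pilishSizes, 0 < d := by decide

theorem pilish_string_spec : Claim_equal_pilish_string := by
  intro t _
  show pilish_string t = pilish_string_alt t
  have hA : pilish_string t = String.ofList (PySem.Chars.join [' '] (goA t.toList pilishSizes 0)) := by
    have h1 : pilish_string t = String.ofList (PySem.Chars.join [' ']
        (("314159265358979".toList.foldl
          (fun st x => stepA t.toList st ((PySem.Int.ofChars? [x]).getD 0)) ([], 0)).1)) := rfl
    rw [h1, ← List.foldl_map, digits_map, foldl_stepA, List.nil_append]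
  by_cases ht : t.toList = []
  · have hlen : ((t.toList.length : Int)) ≤ 0 := by simp [ht]
    rw [hA, goA_past t.toList pilishSizes sizes_pos 0 (le_refl 0) hlen]
    simp only [pilish_string_alt]
    rw [if_pos ht]
    rfl
  · have hB : pilish_string_alt t = String.ofList (PySem.Chars.join [' ']
        (pilishSlices
          (paddedOf t.toList (pilishConsume (t.toList.length : Int) pilishSizes (0, 0)).1)
          (pilishSizes.take (pilishConsume (t.toList.length : Int) pilishSizes (0, 0)).2) 0)) := by
      simp only [pilish_string_alt, paddedOf]
      rw [if_neg ht]
    rw [hA, hB, main_lemma t.toList ht pilishSizes sizes_pos 0 (le_refl 0)]
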